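-- pv_equiv track=rewrite | github.com/clawmem-ai/clawmem-hermes-plugin | client.py | label_description
-- ===== SOURCE A (Python) =====
-- def label_description(label: str) -> str:
--     """Return a description for a ClawMem-managed label."""
--     prefixes = {
--         "type:": "Issue type",
--         "kind:": "Memory kind",
--         "status:": "Conversation lifecycle status",
--         "agent:": "Agent",
--         "date:": "Date",
--         "topic:": "Topic",
--     }
--     for pfx, desc in prefixes.items():
--         if label.startswith(pfx):
--             return f"{desc} label managed by clawmem."
--     return "Label managed by clawmem."
-- ===== SOURCE B (Python) =====
-- def label_description(label: str) -> str:
--     """Return a description for a ClawMem-managed label."""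
--     prefixes = {
--         "type:": "Issue type",
--         "kind:": "Memory kind",
--         "status:": "Conversation lifecycle status",
--         "agent:": "Agent",
--         "date:": "Date",
--         "topic:": "Topic",
--     }
--     i = label.find(":")
--     if i == -1:
--         return "Label managed by clawmem."
--     desc = prefixes.get(label[:i + 1])
--     if desc is None:
--         return "Label managed by clawmem."
--     return f"{desc} label managed by clawmem."
-- ===== Notes on version B (the rewrite author's own statement) =====
-- stated objective: idiomatic
-- what changed: B replaces A's linear scan of the prefix dict with startswith tests by extracting the label's colon-inclusive prefix once (str.find + slice) and doing a single dict lookup.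
import Mathlib
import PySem

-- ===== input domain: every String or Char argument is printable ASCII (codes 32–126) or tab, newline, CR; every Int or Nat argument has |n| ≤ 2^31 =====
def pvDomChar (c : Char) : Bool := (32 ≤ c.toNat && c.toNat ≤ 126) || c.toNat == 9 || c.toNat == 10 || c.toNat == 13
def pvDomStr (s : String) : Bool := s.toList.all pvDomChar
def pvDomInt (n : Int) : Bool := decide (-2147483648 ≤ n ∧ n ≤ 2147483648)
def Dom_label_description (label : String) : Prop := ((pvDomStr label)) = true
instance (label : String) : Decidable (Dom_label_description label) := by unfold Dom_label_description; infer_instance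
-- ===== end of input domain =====

-- B replaces A's linear startswith-scan of the prefix dict by extracting the label's
-- colon-inclusive prefix once and doing a single dict lookup (idiomatic; same return value).

-- ===== PORT A =====
-- the function-level prefix dict (shared literal data, used by both ports)
def pvPrefixes : PySem.Dict String String :=
  PySem.Dict.ofList
    [("type:", "Issue type"), ("kind:", "Memory kind"),
     ("status:", "Conversation lifecycle status"), ("agent:", "Agent"),
     ("date:", "Date"), ("topic:", "Topic")]

-- A's 'for pfx, desc in prefixes.items(): if label.startswith(pfx): return …'
def pvLoopA : List (String × String) → String → String
  | [], _ => "Label managed by clawmem."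
  | (pfx, desc) :: rest, label =>
    if PySem.Str.startswith label pfx then desc ++ " label managed by clawmem."
    else pvLoopA rest label

def label_description (label : String) : String := pvLoopA pvPrefixes.items label

-- ===== PORT B =====
def label_description_alt (label : String) : String :=
  let i := PySem.Str.find label ":"
  if i = -1 then "Label managed by clawmem."
  else
    match PySem.Dict.get? pvPrefixes (PySem.Str.slice label none (some (i + 1))) with
    | none => "Label managed by clawmem."
    | some desc => desc ++ " label managed by clawmem."

-- ===== PRECONDITION & SPEC =====
def Spec_label_description (label : String) (out : String) : Prop := out = label_description_alt label
instance (label : String) (out : String) : Decidable (Spec_label_description label out) := by unfold Spec_label_description; infer_instance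

-- ===== CLAIM (what is proved, stated in full; the proofs are below) =====
def Claim_equal_label_description : Prop := ∀ (label : String), Dom_label_description label → Spec_label_description label (label_description label)

-- ===== LEMMAS AND PROOFS =====

-- If l starts with q ++ [':'] and q itself has no colon, then the first colon of l is
-- at index q.length, and the colon-inclusive prefix l.take (q.length+1) is q ++ [':'].
theorem pv_find_colon_of_prefix (l q : List Char) (hq : ':' ∉ q)
    (hpre : (q ++ [':']) <+: l) :
    PySem.Chars.find l [':'] = (q.length : Int) ∧ l.take (q.length + 1) = q ++ [':'] := by
  obtain ⟨rest, hl⟩ := hpre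
  have hl' : l = q ++ ':' :: rest := by rw [← hl]; simp
  have hocc : [':'] <+: l.drop q.length := by
    rw [hl', List.drop_left]
    exact ⟨rest, rfl⟩
  have hinf : ([':'] : List Char) <:+: l :=
    (List.IsPrefix.isInfix hocc).trans (List.drop_suffix _ _).isInfix
  have hnn : 0 ≤ PySem.Chars.find l [':'] := (PySem.Chars.find_nonneg_iff l [':']).mpr hinf
  obtain ⟨hfound, hmin⟩ := PySem.Chars.find_spec hnn
  set n := (PySem.Chars.find l [':']).toNat with hn
  have hle : n ≤ q.length := by
    by_contra h
    exact hmin q.length (by omega) hocc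
  have heq : n = q.length := by
    by_contra h
    have hlt : n < q.length := by omega
    have hhead : l[n]? = some ':' := by
      obtain ⟨t, ht⟩ := hfound
      have h2 : (l.drop n).head? = some ':' := by rw [← ht]; simp
      rwa [List.head?_drop] at h2
    have hq' : l[n]? = q[n]? := by
      rw [hl', List.getElem?_append_left hlt]
    rw [hq'] at hhead
    exact hq (List.mem_of_getElem? hhead)
  refine ⟨by omega, ?_⟩
  rw [← hl, List.take_append]
  simp

-- the colon-inclusive slice B looks up is always a prefix of the label
theorem pv_key_prefix (label : String) (i : Int) (hi : 0 ≤ i) :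
    (PySem.Str.slice label none (some (i + 1))).toList <+: label.toList := by
  rw [PySem.Str.toList_slice, PySem.Chars.slice_eq_listSlice,
    PySem.List.slice_to label.toList (show (0:Int) ≤ i + 1 by omega)]
  exact List.take_prefix _ _

-- positive case, generic in the prefix: if label starts with q ++ ":", the first colon
-- is at q.length and B's slice is exactly the string q ++ ":"
theorem pv_pos (label p : String) (q : List Char) (hq : ':' ∉ q)
    (hp : p.toList = q ++ [':'])
    (h : PySem.Str.startswith label p = true) :
    PySem.Chars.find label.toList [':'] = (q.length : Int) ∧
      PySem.Str.slice label none (some ((q.length : Int) + 1)) = p := by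
  have hpre : p.toList <+: label.toList := by
    rw [PySem.Str.startswith_eq] at h
    exact (PySem.Chars.startswith_iff _ _).mp h
  rw [hp] at hpre
  obtain ⟨hfind, htake⟩ := pv_find_colon_of_prefix label.toList q hq hpre
  refine ⟨hfind, ?_⟩
  rw [← String.toList_inj, PySem.Str.toList_slice, PySem.Chars.slice_eq_listSlice,
    PySem.List.slice_to label.toList (show (0:Int) ≤ (q.length : Int) + 1 by omega), hp]
  have h5 : ((q.length : Int) + 1).toNat = q.length + 1 := by omega
  rw [h5, htake]

theorem pv_items : pvPrefixes.items =
    [("type:", "Issue type"), ("kind:", "Memory kind"),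
     ("status:", "Conversation lifecycle status"), ("agent:", "Agent"),
     ("date:", "Date"), ("topic:", "Topic")] := by rfl

theorem pv_main (label : String) : label_description label = label_description_alt label := by
  by_cases h1 : PySem.Str.startswith label "type:" = true
  · -- prefix matches: first colon at a known index, B looks up the same key
    obtain ⟨hf, hk⟩ := pv_pos label "type:" "type".toList (by decide) (by decide) h1
    have hf' : PySem.Chars.find label.toList [':'] = (4 : Int) := by simpa using hf
    have hk' : PySem.Str.slice label none (some 5) = "type:" := by simpa using hk
    have hg : PySem.Dict.get? pvPrefixes "type:" = some "Issue type" := by rfl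
    have h1' : PySem.Chars.startswith label.toList ['t', 'y', 'p', 'e', ':'] = true := by simpa using h1
    simp [label_description, pvLoopA, pv_items, h1', label_description_alt, hf', hk', hg]
  ·
    by_cases h2 : PySem.Str.startswith label "kind:" = true
    · -- prefix matches: first colon at a known index, B looks up the same key
      have h1' : PySem.Chars.startswith label.toList ['t', 'y', 'p', 'e', ':'] = false := by simpa using h1
      obtain ⟨hf, hk⟩ := pv_pos label "kind:" "kind".toList (by decide) (by decide) h2
      have hf' : PySem.Chars.find label.toList [':'] = (4 : Int) := by simpa using hf
      have hk' : PySem.Str.slice label none (some 5) = "kind:" := by simpa using hk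
      have hg : PySem.Dict.get? pvPrefixes "kind:" = some "Memory kind" := by rfl
      have h2' : PySem.Chars.startswith label.toList ['k', 'i', 'n', 'd', ':'] = true := by simpa using h2
      simp [label_description, pvLoopA, pv_items, h1', h2', label_description_alt, hf', hk', hg]
    ·
      by_cases h3 : PySem.Str.startswith label "status:" = true
      · -- prefix matches: first colon at a known index, B looks up the same key
        have h1' : PySem.Chars.startswith label.toList ['t', 'y', 'p', 'e', ':'] = false := by simpa using h1
        have h2' : PySem.Chars.startswith label.toList ['k', 'i', 'n', 'd', ':'] = false := by simpa using h2
        obtain ⟨hf, hk⟩ := pv_pos label "status:" "status".toList (by decide) (by decide) h3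
        have hf' : PySem.Chars.find label.toList [':'] = (6 : Int) := by simpa using hf
        have hk' : PySem.Str.slice label none (some 7) = "status:" := by simpa using hk
        have hg : PySem.Dict.get? pvPrefixes "status:" = some "Conversation lifecycle status" := by rfl
        have h3' : PySem.Chars.startswith label.toList ['s', 't', 'a', 't', 'u', 's', ':'] = true := by simpa using h3
        simp [label_description, pvLoopA, pv_items, h1', h2', h3', label_description_alt, hf', hk', hg]
      ·
        by_cases h4 : PySem.Str.startswith label "agent:" = true
        · -- prefix matches: first colon at a known index, B looks up the same key
          have h1' : PySem.Chars.startswith label.toList ['t', 'y', 'p', 'e', ':'] = false := by simpa using h1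
          have h2' : PySem.Chars.startswith label.toList ['k', 'i', 'n', 'd', ':'] = false := by simpa using h2
          have h3' : PySem.Chars.startswith label.toList ['s', 't', 'a', 't', 'u', 's', ':'] = false := by simpa using h3
          obtain ⟨hf, hk⟩ := pv_pos label "agent:" "agent".toList (by decide) (by decide) h4
          have hf' : PySem.Chars.find label.toList [':'] = (5 : Int) := by simpa using hf
          have hk' : PySem.Str.slice label none (some 6) = "agent:" := by simpa using hk
          have hg : PySem.Dict.get? pvPrefixes "agent:" = some "Agent" := by rfl
          have h4' : PySem.Chars.startswith label.toList ['a', 'g', 'e', 'n', 't', ':'] = true := by simpa using h4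
          simp [label_description, pvLoopA, pv_items, h1', h2', h3', h4', label_description_alt, hf', hk', hg]
        ·
          by_cases h5 : PySem.Str.startswith label "date:" = true
          · -- prefix matches: first colon at a known index, B looks up the same key
            have h1' : PySem.Chars.startswith label.toList ['t', 'y', 'p', 'e', ':'] = false := by simpa using h1
            have h2' : PySem.Chars.startswith label.toList ['k', 'i', 'n', 'd', ':'] = false := by simpa using h2
            have h3' : PySem.Chars.startswith label.toList ['s', 't', 'a', 't', 'u', 's', ':'] = false := by simpa using h3
            have h4' : PySem.Chars.startswith label.toList ['a', 'g', 'e', 'n', 't', ':'] = false := by simpa using h4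
            obtain ⟨hf, hk⟩ := pv_pos label "date:" "date".toList (by decide) (by decide) h5
            have hf' : PySem.Chars.find label.toList [':'] = (4 : Int) := by simpa using hf
            have hk' : PySem.Str.slice label none (some 5) = "date:" := by simpa using hk
            have hg : PySem.Dict.get? pvPrefixes "date:" = some "Date" := by rfl
            have h5' : PySem.Chars.startswith label.toList ['d', 'a', 't', 'e', ':'] = true := by simpa using h5
            simp [label_description, pvLoopA, pv_items, h1', h2', h3', h4', h5', label_description_alt, hf', hk', hg]
          ·
            by_cases h6 : PySem.Str.startswith label "topic:" = true
            · -- prefix matches: first colon at a known index, B looks up the same key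
              have h1' : PySem.Chars.startswith label.toList ['t', 'y', 'p', 'e', ':'] = false := by simpa using h1
              have h2' : PySem.Chars.startswith label.toList ['k', 'i', 'n', 'd', ':'] = false := by simpa using h2
              have h3' : PySem.Chars.startswith label.toList ['s', 't', 'a', 't', 'u', 's', ':'] = false := by simpa using h3
              have h4' : PySem.Chars.startswith label.toList ['a', 'g', 'e', 'n', 't', ':'] = false := by simpa using h4
              have h5' : PySem.Chars.startswith label.toList ['d', 'a', 't', 'e', ':'] = false := by simpa using h5
              obtain ⟨hf, hk⟩ := pv_pos label "topic:" "topic".toList (by decide) (by decide) h6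
              have hf' : PySem.Chars.find label.toList [':'] = (5 : Int) := by simpa using hf
              have hk' : PySem.Str.slice label none (some 6) = "topic:" := by simpa using hk
              have hg : PySem.Dict.get? pvPrefixes "topic:" = some "Topic" := by rfl
              have h6' : PySem.Chars.startswith label.toList ['t', 'o', 'p', 'i', 'c', ':'] = true := by simpa using h6
              simp [label_description, pvLoopA, pv_items, h1', h2', h3', h4', h5', h6', label_description_alt, hf', hk', hg]
            ·
              -- no prefix matches: A falls through; B's lookup misses
              have h1' : PySem.Chars.startswith label.toList ['t', 'y', 'p', 'e', ':'] = false := by simpa using h1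
              have h2' : PySem.Chars.startswith label.toList ['k', 'i', 'n', 'd', ':'] = false := by simpa using h2
              have h3' : PySem.Chars.startswith label.toList ['s', 't', 'a', 't', 'u', 's', ':'] = false := by simpa using h3
              have h4' : PySem.Chars.startswith label.toList ['a', 'g', 'e', 'n', 't', ':'] = false := by simpa using h4
              have h5' : PySem.Chars.startswith label.toList ['d', 'a', 't', 'e', ':'] = false := by simpa using h5
              have h6' : PySem.Chars.startswith label.toList ['t', 'o', 'p', 'i', 'c', ':'] = false := by simpa using h6
              by_cases hc : PySem.Chars.find label.toList [':'] = -1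
              ·
                simp [label_description, pvLoopA, pv_items, h1', h2', h3', h4', h5', h6', label_description_alt, hc]
              ·
                have hi : 0 ≤ PySem.Chars.find label.toList [':'] :=
                  (PySem.Chars.find_nonneg_iff _ _).mpr ((PySem.Chars.find_ne_neg_one_iff _ _).mp hc)
                have knp : ∀ p : String, PySem.Chars.startswith label.toList p.toList = false →
                    (p == PySem.Str.slice label none (some (PySem.Chars.find label.toList [':'] + 1))) = false := by
                  intro p hp
                  rw [beq_eq_false_iff_ne]
                  intro he
                  have hkp := pv_key_prefix label _ hi
                  rw [← he] at hkp
                  rw [(PySem.Chars.startswith_iff _ _).mpr hkp] at hp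
                  simp at hp
                have hnone : List.find? (fun p => p.1 == PySem.Str.slice label none (some (PySem.Chars.find label.toList [':'] + 1)))
                    [("type:", "Issue type"), ("kind:", "Memory kind"),
                     ("status:", "Conversation lifecycle status"), ("agent:", "Agent"),
                     ("date:", "Date"), ("topic:", "Topic")] = none := by
                  simp only [List.find?]
                  have e1 := knp "type:" (by simpa using h1')
                  rw [show (("type:" : String) == PySem.Str.slice label none (some (PySem.Chars.find label.toList [':'] + 1))) = false from e1]
                  have e2 := knp "kind:" (by simpa using h2')
                  rw [show (("kind:" : String) == PySem.Str.slice label none (some (PySem.Chars.find label.toList [':'] + 1))) = false from e2]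
                  have e3 := knp "status:" (by simpa using h3')
                  rw [show (("status:" : String) == PySem.Str.slice label none (some (PySem.Chars.find label.toList [':'] + 1))) = false from e3]
                  have e4 := knp "agent:" (by simpa using h4')
                  rw [show (("agent:" : String) == PySem.Str.slice label none (some (PySem.Chars.find label.toList [':'] + 1))) = false from e4]
                  have e5 := knp "date:" (by simpa using h5')
                  rw [show (("date:" : String) == PySem.Str.slice label none (some (PySem.Chars.find label.toList [':'] + 1))) = false from e5]
                  have e6 := knp "topic:" (by simpa using h6')
                  rw [show (("topic:" : String) == PySem.Str.slice label none (some (PySem.Chars.find label.toList [':'] + 1))) = false from e6]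
                simp [label_description, pvLoopA, pv_items, h1', h2', h3', h4', h5', h6', label_description_alt, hc, PySem.Dict.get?, hnone]
-- ===== VERDICT (by name: the statement is the Claim_ definition above) =====
theorem label_description_spec : Claim_equal_label_description := by
  intro label _
  unfold Spec_label_description
  exact pv_main label
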